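-- pv_equiv track=rewrite | github.com/aydin-ege/bilkent-course-scheduler | web_server.py | check_time_collision
-- ===== SOURCE A (Python) =====
-- def check_time_collision(course_combo):
--     schedule = {}
--     for course_3 in course_combo:
--         course_times = course_3[1]
--         for day in course_times:
--             if day not in schedule:
--                 schedule[day] = []
--             if any(i in schedule[day] for i in course_times[day]):
--                 return False
--             schedule[day].extend(course_times[day])
--     return True
-- ===== SOURCE B (Python) =====
-- def check_time_collision(course_combo):
--     n = len(course_combo)
--     for i in range(n):
--         days_i = {day: set(slots) for day, slots in course_combo[i][1].items()}
--         for j in range(i + 1, n):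
--             for day, slots in course_combo[j][1].items():
--                 if day in days_i and any(s in days_i[day] for s in slots):
--                     return False
--     return True
-- ===== Notes on version B (the rewrite author's own statement) =====
-- stated objective: alternative
-- what changed: Replaces A's single pass that accumulates a day-to-slots schedule index with a direct pairwise check: every unordered pair of distinct courses is tested for a shared day with intersecting slot sets; Pre_ excludes association lists with duplicate day keys inside one course, which do not encode a Python dict (A's per-course times is a dict, so such keys collapse before A ever runs).
import Mathlib
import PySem

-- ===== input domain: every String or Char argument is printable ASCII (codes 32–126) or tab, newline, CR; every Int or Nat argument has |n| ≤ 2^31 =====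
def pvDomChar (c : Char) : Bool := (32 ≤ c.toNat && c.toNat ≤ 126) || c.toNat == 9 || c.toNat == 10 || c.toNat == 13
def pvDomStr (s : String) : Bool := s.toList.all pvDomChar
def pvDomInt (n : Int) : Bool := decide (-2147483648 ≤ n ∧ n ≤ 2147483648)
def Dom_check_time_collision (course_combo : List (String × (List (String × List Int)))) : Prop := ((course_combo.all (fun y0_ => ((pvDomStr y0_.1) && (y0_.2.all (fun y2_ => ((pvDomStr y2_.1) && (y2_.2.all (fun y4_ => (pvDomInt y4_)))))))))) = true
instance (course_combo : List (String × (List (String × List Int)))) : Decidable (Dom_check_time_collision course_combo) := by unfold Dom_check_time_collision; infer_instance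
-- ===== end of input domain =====

-- B replaces A's one-pass accumulated day→slots schedule index by a direct check of
-- every unordered pair of distinct courses for a shared day with intersecting slots
-- (alternative decomposition, same True/False result).


-- ===== PORT A =====
-- inner 'for day in course_times: …' loop of A; the schedule dict is a PySem.Dict.
-- 'if day not in schedule: schedule[day] = []' followed by reads of schedule[day] is
-- exactly 'sched.getD day []'; 'course_times[day]' is the pair's slots (under
-- Pre_check_time_collision the association list has unique keys, like the Python dict).
def pvStepCourse (sched : PySem.Dict String (List Int)) :
    List (String × List Int) → Option (PySem.Dict String (List Int))
  | [] => some sched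
  | (day, slots) :: rest =>
    let cur := sched.getD day []
    if slots.any (fun i => cur.contains i) then none       -- 'return False'
    else pvStepCourse (sched.insert day (cur ++ slots)) rest  -- 'schedule[day].extend(…)'

-- outer 'for course_3 in course_combo' loop of A
def pvLoopA (sched : PySem.Dict String (List Int)) :
    List (String × (List (String × List Int))) → Bool
  | [] => true
  | c :: rest =>
    match pvStepCourse sched c.2 with
    | none => false
    | some s => pvLoopA s rest

def check_time_collision (course_combo : List (String × (List (String × List Int)))) : Bool :=
  pvLoopA PySem.Dict.empty course_combo

-- ===== PORT B =====
-- 'any day of cj also occurs in ci with a common slot' (B's dict-of-sets days_i lookup: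
-- under unique day keys, scanning ci's entries for the matching day is that dict lookup,
-- and set membership coincides with list membership)
def pvPairClash (ci cj : List (String × List Int)) : Bool :=
  cj.any (fun p => ci.any (fun q => q.1 == p.1 && p.2.any (fun s => q.2.contains s)))

-- B's 'for i … for j in range(i+1, n)' pairing, as recursion on tails
def pvPairsOK : List (String × (List (String × List Int))) → Bool
  | [] => true
  | c :: rest => (rest.all (fun c' => !pvPairClash c.2 c'.2)) && pvPairsOK rest

def check_time_collision_alt (course_combo : List (String × (List (String × List Int)))) : Bool :=
  pvPairsOK course_combo

-- ===== PRECONDITION & SPEC =====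
-- Pre_ excludes association lists with duplicate day keys inside a single course: they do
-- not encode a Python dict (A's per-course times IS a dict, so duplicate keys are
-- unrepresentable there and collapse before A runs), so no behaviour of A exists for them.
def Pre_check_time_collision (course_combo : List (String × (List (String × List Int)))) : Prop :=
  ∀ c ∈ course_combo, (c.2.map Prod.fst).Nodup
instance (course_combo : List (String × (List (String × List Int)))) : Decidable (Pre_check_time_collision course_combo) := by unfold Pre_check_time_collision; infer_instance

def pvWitness_check_time_collision : (List (String × (List (String × List Int)))) :=
  [("CS 101", [("Mon", [1, 2]), ("Wed", [3])]), ("MATH 102", [("Mon", [3]), ("Tue", [1])])]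

def Spec_check_time_collision (course_combo : List (String × (List (String × List Int)))) (out : Bool) : Prop := out = check_time_collision_alt course_combo
instance (course_combo : List (String × (List (String × List Int)))) (out : Bool) : Decidable (Spec_check_time_collision course_combo out) := by unfold Spec_check_time_collision; infer_instance

-- ===== CLAIM (what is proved, stated in full; the proofs are below) =====
def Claim_equal_check_time_collision : Prop := ∀ (course_combo : List (String × (List (String × List Int)))), Dom_check_time_collision course_combo → Pre_check_time_collision course_combo → Spec_check_time_collision course_combo (check_time_collision course_combo)

-- ===== LEMMAS AND PROOFS =====

-- all slots the day-list ct assigns to day d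
def pvEntrySlots (ct : List (String × List Int)) (d : String) : List Int :=
  (ct.filter (fun p => p.1 == d)).flatMap Prod.snd

-- ct has a slot already present in the schedule
def pvClashS (sched : PySem.Dict String (List Int)) (ct : List (String × List Int)) : Prop :=
  ∃ p ∈ ct, ∃ s ∈ p.2, s ∈ sched.getD p.1 []

lemma pvEntrySlots_cons (day d : String) (slots : List Int) (tl : List (String × List Int)) :
    pvEntrySlots ((day, slots) :: tl) d =
      if day = d then slots ++ pvEntrySlots tl d else pvEntrySlots tl d := by
  unfold pvEntrySlots
  rw [List.filter_cons]
  by_cases h : day = d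
  · simp [h]
  · simp [h]

lemma pvEntrySlots_nil_of_not_mem (ct : List (String × List Int)) (d : String)
    (h : d ∉ ct.map Prod.fst) : pvEntrySlots ct d = [] := by
  unfold pvEntrySlots
  rw [List.filter_eq_nil_iff.mpr]
  · rfl
  · intro p hp hbeq
    exact h (List.mem_map.mpr ⟨p, hp, by simpa using hbeq⟩)

lemma pvMem_entrySlots (ct : List (String × List Int)) (d : String) (s : Int) :
    s ∈ pvEntrySlots ct d ↔ ∃ q ∈ ct, q.1 = d ∧ s ∈ q.2 := by
  unfold pvEntrySlots
  simp only [List.mem_flatMap, List.mem_filter, beq_iff_eq]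
  constructor
  · rintro ⟨q, ⟨hq, hqd⟩, hs⟩
    exact ⟨q, hq, hqd, hs⟩
  · rintro ⟨q, hq, hqd, hs⟩
    exact ⟨q, ⟨hq, hqd⟩, hs⟩

lemma pvStep_none_iff (ct : List (String × List Int)) :
    ∀ sched, (ct.map Prod.fst).Nodup →
      (pvStepCourse sched ct = none ↔ pvClashS sched ct) := by
  induction ct with
  | nil => intro sched _; simp [pvStepCourse, pvClashS]
  | cons hd tl ih =>
    intro sched hnd
    obtain ⟨day, slots⟩ := hd
    simp only [List.map_cons, List.nodup_cons] at hnd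
    have hday : day ∉ tl.map Prod.fst := hnd.1
    simp only [pvStepCourse]
    by_cases hcl : slots.any (fun i => (sched.getD day []).contains i) = true
    · rw [if_pos hcl]
      constructor
      · intro _
        rcases List.any_eq_true.mp hcl with ⟨s, hs, hmem⟩
        exact ⟨(day, slots), List.mem_cons_self, s, hs, by simpa using hmem⟩
      · intro _; rfl
    · rw [if_neg hcl, ih _ hnd.2]
      unfold pvClashS
      constructor
      · rintro ⟨p, hp, s, hs, hmem⟩
        refine ⟨p, List.mem_cons_of_mem _ hp, s, hs, ?_⟩
        have hpne : p.1 ≠ day := fun h => hday (h ▸ List.mem_map.mpr ⟨p, hp, rfl⟩)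
        rwa [PySem.Dict.getD_insert_of_ne _ _ _ hpne] at hmem
      · rintro ⟨p, hp, s, hs, hmem⟩
        rcases List.mem_cons.mp hp with rfl | hp'
        · exact absurd (List.any_eq_true.mpr ⟨s, hs, List.contains_iff_mem.mpr hmem⟩) hcl
        · refine ⟨p, hp', s, hs, ?_⟩
          have hpne : p.1 ≠ day := fun h => hday (h ▸ List.mem_map.mpr ⟨p, hp', rfl⟩)
          rwa [PySem.Dict.getD_insert_of_ne _ _ _ hpne]

lemma pvStep_some_getD (ct : List (String × List Int)) :
    ∀ sched s, (ct.map Prod.fst).Nodup → pvStepCourse sched ct = some s →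
      ∀ d, s.getD d [] = sched.getD d [] ++ pvEntrySlots ct d := by
  induction ct with
  | nil =>
    intro sched s _ h d
    simp only [pvStepCourse, Option.some.injEq] at h
    simp [← h, pvEntrySlots]
  | cons hd tl ih =>
    intro sched s hnd h d
    obtain ⟨day, slots⟩ := hd
    simp only [List.map_cons, List.nodup_cons] at hnd
    simp only [pvStepCourse] at h
    by_cases hcl : slots.any (fun i => (sched.getD day []).contains i) = true
    · rw [if_pos hcl] at h; exact absurd h (by simp)
    · rw [if_neg hcl] at h
      rw [ih _ _ hnd.2 h d, pvEntrySlots_cons]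
      by_cases hd' : day = d
      · subst hd'
        rw [if_pos rfl, PySem.Dict.getD_insert_self,
          pvEntrySlots_nil_of_not_mem tl day hnd.1, List.append_nil, List.append_nil]
      · rw [if_neg hd', PySem.Dict.getD_insert_of_ne _ _ _ (Ne.symm hd')]

lemma pvPairClash_iff (ci cj : List (String × List Int)) :
    pvPairClash ci cj = true ↔ ∃ p ∈ cj, ∃ s ∈ p.2, s ∈ pvEntrySlots ci p.1 := by
  unfold pvPairClash
  simp only [List.any_eq_true, Bool.and_eq_true, beq_iff_eq, List.contains_iff_mem]
  constructor
  · rintro ⟨p, hp, q, hq, hqp, s, hs, hsq⟩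
    exact ⟨p, hp, s, hs, (pvMem_entrySlots ci p.1 s).mpr ⟨q, hq, hqp, hsq⟩⟩
  · rintro ⟨p, hp, s, hs, hmem⟩
    rcases (pvMem_entrySlots ci p.1 s).mp hmem with ⟨q, hq, hqd, hsq⟩
    exact ⟨p, hp, q, hq, hqd, s, hs, hsq⟩

lemma pvLoopA_iff (cs : List (String × (List (String × List Int)))) :
    ∀ sched, (∀ c ∈ cs, (c.2.map Prod.fst).Nodup) →
      (pvLoopA sched cs = true ↔
        (∀ c ∈ cs, ¬ pvClashS sched c.2) ∧ pvPairsOK cs = true) := by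
  induction cs with
  | nil => intro sched _; simp [pvLoopA, pvPairsOK]
  | cons c rest ih =>
    intro sched hnd
    have hndc : (c.2.map Prod.fst).Nodup := hnd c List.mem_cons_self
    have hndr : ∀ c' ∈ rest, (c'.2.map Prod.fst).Nodup :=
      fun c' h => hnd c' (List.mem_cons_of_mem _ h)
    simp only [pvLoopA]
    cases hstep : pvStepCourse sched c.2 with
    | none =>
      have hclash : pvClashS sched c.2 := (pvStep_none_iff c.2 sched hndc).mp hstep
      simp only [Bool.false_eq_true, false_iff]
      intro hall
      exact hall.1 c List.mem_cons_self hclash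
    | some s =>
      have hnoclash : ¬ pvClashS sched c.2 := by
        intro hcl
        rw [← pvStep_none_iff c.2 sched hndc] at hcl
        simp [hstep] at hcl
      have hgetD := pvStep_some_getD c.2 sched s hndc hstep
      rw [ih s hndr]
      have hsplit : ∀ c' : String × (List (String × List Int)),
          pvClashS s c'.2 ↔ pvClashS sched c'.2 ∨ pvPairClash c.2 c'.2 = true := by
        intro c'
        rw [pvPairClash_iff]
        unfold pvClashS
        constructor
        · rintro ⟨p, hp, t, ht, hmem⟩
          rw [hgetD p.1] at hmem
          rcases List.mem_append.mp hmem with h | h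
          · exact Or.inl ⟨p, hp, t, ht, h⟩
          · exact Or.inr ⟨p, hp, t, ht, h⟩
        · rintro (⟨p, hp, t, ht, hmem⟩ | ⟨p, hp, t, ht, hmem⟩) <;>
            exact ⟨p, hp, t, ht, by rw [hgetD p.1]; exact List.mem_append.mpr (by tauto)⟩
      have hpk : pvPairsOK (c :: rest) =
          ((rest.all (fun c' => !pvPairClash c.2 c'.2)) && pvPairsOK rest) := rfl
      rw [hpk]
      simp only [Bool.and_eq_true, List.all_eq_true, Bool.not_eq_eq_eq_not, Bool.not_true]
      constructor
      · rintro ⟨hrest, hpok⟩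
        refine ⟨?_, ?_, hpok⟩
        · intro c'' hc''
          rcases List.mem_cons.mp hc'' with rfl | h
          · exact hnoclash
          · exact fun hcl => (hrest c'' h) ((hsplit c'').mpr (Or.inl hcl))
        · intro c'' h
          by_contra hne
          have : pvPairClash c.2 c''.2 = true := by
            cases hb : pvPairClash c.2 c''.2
            · exact absurd hb hne
            · rfl
          exact (hrest c'' h) ((hsplit c'').mpr (Or.inr this))
      · rintro ⟨hall, hnp, hpok⟩
        refine ⟨?_, hpok⟩
        intro c'' h hcl
        rcases (hsplit c'').mp hcl with hl | hr
        · exact hall c'' (List.mem_cons_of_mem _ h) hl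
        · have := hnp c'' h
          rw [hr] at this
          simp at this

-- ===== VERDICT (by name: the statement is the Claim_ definition above) =====
theorem check_time_collision_spec : Claim_equal_check_time_collision := by
  intro combo _ hpre
  unfold Spec_check_time_collision check_time_collision check_time_collision_alt
  have h := pvLoopA_iff combo PySem.Dict.empty hpre
  have hempty : ∀ c ∈ combo, ¬ pvClashS PySem.Dict.empty c.2 := by
    rintro c _ ⟨p, _, s, _, hmem⟩
    simp [PySem.Dict.getD_empty] at hmem
  rcases hA : pvLoopA PySem.Dict.empty combo with _ | _
  · rcases hB : pvPairsOK combo with _ | _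
    · rfl
    · exact absurd (h.mpr ⟨hempty, hB⟩) (by simp [hA])
  · exact ((h.mp hA).2).symm
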